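-- pv_equiv track=rewrite | github.com/rcalef/magneton | magneton/esm_embed.py | get_chunk_idxs
-- ===== SOURCE A (Python) =====
-- from typing import List
--
-- def get_chunk_idxs(
--     seq_len: int,
--     max_len: int,
-- ) -> List[int]:
--     num_pieces = (seq_len + max_len - 1) // max_len
--     lo_size = seq_len // num_pieces
--     hi_size = lo_size + 1
--     num_hi = seq_len % num_pieces
--
--     chunk_lens = [hi_size for _ in range(num_hi)] + [lo_size for _ in range(num_pieces - num_hi)]
--
--     chunk_idxs = []
--     curr = 0
--     for chunk_len in chunk_lens:
--         chunk_idxs.append((curr, curr+chunk_len))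
--         curr += chunk_len
--     return chunk_idxs
-- ===== SOURCE B (Python) =====
-- def get_chunk_idxs(
--     seq_len: int,
--     max_len: int,
-- ):
--     num_pieces = (seq_len + max_len - 1) // max_len
--     lo_size = seq_len // num_pieces
--     num_hi = seq_len % num_pieces
--     return [
--         (i * lo_size + min(i, num_hi), (i + 1) * lo_size + min(i + 1, num_hi))
--         for i in range(num_pieces)
--     ]
-- ===== Notes on version B (the rewrite author's own statement) =====
-- stated objective: simpler
-- what changed: Drops the chunk_lens list and the running curr accumulator: each chunk boundary is computed in closed form from its index as i*lo_size + min(i, num_hi), so there is no prefix-sum loop state.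
import Mathlib
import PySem

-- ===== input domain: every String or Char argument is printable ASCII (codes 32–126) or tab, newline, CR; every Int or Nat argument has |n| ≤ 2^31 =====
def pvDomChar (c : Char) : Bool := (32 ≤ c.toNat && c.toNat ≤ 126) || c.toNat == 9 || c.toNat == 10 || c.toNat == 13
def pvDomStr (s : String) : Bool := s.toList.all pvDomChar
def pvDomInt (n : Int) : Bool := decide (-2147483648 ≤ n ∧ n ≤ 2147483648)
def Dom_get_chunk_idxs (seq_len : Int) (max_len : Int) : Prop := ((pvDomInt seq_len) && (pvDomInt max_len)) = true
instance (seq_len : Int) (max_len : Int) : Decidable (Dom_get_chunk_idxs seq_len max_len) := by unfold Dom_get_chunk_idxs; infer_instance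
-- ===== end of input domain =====

-- B replaces A's chunk-length list and running prefix-sum accumulator by closed-form
-- per-index boundary arithmetic (objective: simpler). Same values wherever A returns.

-- ===== PORT A =====
-- the loop body 'chunk_idxs.append((curr, curr+chunk_len)); curr += chunk_len' as a fold step
def pvStepA (st : List (Int × Int) × Int) (chunk_len : Int) : List (Int × Int) × Int :=
  (st.1 ++ [(st.2, st.2 + chunk_len)], st.2 + chunk_len)

def get_chunk_idxs (seq_len : Int) (max_len : Int) : List (Int × Int) :=
  let num_pieces := PySem.Int.floordiv (seq_len + max_len - 1) max_len
  let lo_size := PySem.Int.floordiv seq_len num_pieces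
  let hi_size := lo_size + 1
  let num_hi := PySem.Int.mod seq_len num_pieces
  let chunk_lens := (PySem.List.pyRange 0 num_hi 1).map (fun _ => hi_size) ++
                    (PySem.List.pyRange 0 (num_pieces - num_hi) 1).map (fun _ => lo_size)
  (chunk_lens.foldl pvStepA ([], 0)).1

-- ===== PORT B =====
def get_chunk_idxs_alt (seq_len : Int) (max_len : Int) : List (Int × Int) :=
  let num_pieces := PySem.Int.floordiv (seq_len + max_len - 1) max_len
  let lo_size := PySem.Int.floordiv seq_len num_pieces
  let num_hi := PySem.Int.mod seq_len num_pieces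
  (PySem.List.pyRange 0 num_pieces 1).map (fun i =>
    (i * lo_size + min i num_hi, (i + 1) * lo_size + min (i + 1) num_hi))

-- ===== PRECONDITION & SPEC =====
-- Pre_ excludes exactly the inputs where Python A raises ZeroDivisionError:
-- max_len = 0, or num_pieces = (seq_len + max_len - 1) // max_len = 0 (B raises there too).
def Pre_get_chunk_idxs (seq_len : Int) (max_len : Int) : Prop :=
  max_len ≠ 0 ∧ PySem.Int.floordiv (seq_len + max_len - 1) max_len ≠ 0
instance (seq_len : Int) (max_len : Int) : Decidable (Pre_get_chunk_idxs seq_len max_len) := by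
  unfold Pre_get_chunk_idxs; infer_instance
def pvWitness_get_chunk_idxs : Int × Int := (10, 3)

def Spec_get_chunk_idxs (seq_len : Int) (max_len : Int) (out : List (Int × Int)) : Prop :=
  out = get_chunk_idxs_alt seq_len max_len
instance (seq_len : Int) (max_len : Int) (out : List (Int × Int)) : Decidable (Spec_get_chunk_idxs seq_len max_len out) := by
  unfold Spec_get_chunk_idxs; infer_instance

-- ===== CLAIM (what is proved, stated in full; the proofs are below) =====
def Claim_equal_get_chunk_idxs : Prop := ∀ (seq_len : Int) (max_len : Int), Dom_get_chunk_idxs seq_len max_len → Pre_get_chunk_idxs seq_len max_len → Spec_get_chunk_idxs seq_len max_len (get_chunk_idxs seq_len max_len)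

-- ===== LEMMAS AND PROOFS =====

-- a constant-map comprehension over range(n) is a replicate
theorem pv_map_const_range (m : Nat) (x : Int) :
    (List.range m).map (fun _ => x) = List.replicate m x := by
  induction m with
  | zero => rfl
  | succ k ih =>
    rw [List.range_succ, List.map_append, ih, List.map_singleton,
      List.replicate_succ' (n := k)]

-- closed form of A's prefix-sum fold over a replicated chunk length
theorem pv_fold_replicate (a : Nat) (x : Int) :
    ∀ (acc : List (Int × Int)) (c : Int),
      (List.replicate a x).foldl pvStepA (acc, c) =
        (acc ++ (List.range a).map (fun (j : Nat) => (c + (j : Int) * x, c + ((j : Int) + 1) * x)),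
         c + (a : Int) * x) := by
  induction a with
  | zero => intro acc c; simp
  | succ k ih =>
    intro acc c
    rw [List.replicate_succ, List.foldl_cons]
    show (List.replicate k x).foldl pvStepA (acc ++ [(c, c + x)], c + x) = _
    rw [ih, List.range_succ_eq_map, List.map_cons, List.map_map]
    simp only [Prod.mk.injEq, List.append_assoc, List.singleton_append, Function.comp_def]
    refine ⟨?_, by push_cast; ring⟩
    congr 1
    congr 1
    · simp only [Prod.mk.injEq]
      constructor <;> ring
    · apply List.map_congr_left
      intro j _
      simp only [Prod.mk.injEq]
      push_cast
      constructor <;> ring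

theorem get_chunk_idxs_spec : Claim_equal_get_chunk_idxs := by
  intro s m _ hpre
  obtain ⟨hm, hP⟩ := hpre
  show get_chunk_idxs s m = get_chunk_idxs_alt s m
  unfold get_chunk_idxs get_chunk_idxs_alt
  simp only []
  set P := PySem.Int.floordiv (s + m - 1) m with hPdef
  set lo := PySem.Int.floordiv s P with hlo
  set h := PySem.Int.mod s P with hh
  rcases lt_or_gt_of_ne hP with hneg | hpos
  · -- num_pieces < 0: every range is empty, both sides are []
    have hbound : P < h ∧ h ≤ 0 := by
      have := PySem.Int.mod_neg_neg (-s) (-P)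
      simp only [neg_neg] at this
      have hb : 0 ≤ PySem.Int.mod (-s) (-P) ∧ PySem.Int.mod (-s) (-P) < -P := by
        rw [PySem.Int.mod_eq_emod_of_pos (by omega)]
        exact ⟨Int.emod_nonneg _ (by omega), Int.emod_lt_of_pos _ (by omega)⟩
      rw [hh, this]
      omega
    rw [PySem.List.pyRange_one_eq_nil (by omega : h ≤ 0),
        PySem.List.pyRange_one_eq_nil (by omega : P - h ≤ 0),
        PySem.List.pyRange_one_eq_nil (by omega : P ≤ 0)]
    rfl
  · -- num_pieces > 0: compare the two lists piecewise
    have hbound : 0 ≤ h ∧ h < P := by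
      rw [hh, PySem.Int.mod_eq_emod_of_pos hpos]
      exact ⟨Int.emod_nonneg _ (by omega), Int.emod_lt_of_pos _ hpos⟩
    obtain ⟨h0, hP'⟩ := hbound
    set a := h.toNat with ha
    set b := (P - h).toNat with hb
    have hha : (a : Int) = h := Int.toNat_of_nonneg h0
    have hhb : (b : Int) = P - h := Int.toNat_of_nonneg (by omega)
    rw [PySem.List.pyRange_one 0 h, PySem.List.pyRange_one 0 (P - h),
        PySem.List.pyRange_one 0 P]
    have hcast : (P - 0).toNat = a + b := by omega
    have hcast2 : (h - 0).toNat = a := by omega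
    have hcast3 : (P - h - 0).toNat = b := by omega
    rw [hcast, hcast2, hcast3, List.range_add]
    simp only [List.map_map, List.map_append, Function.comp_def, zero_add]
    rw [pv_map_const_range, pv_map_const_range, List.foldl_append,
        pv_fold_replicate, pv_fold_replicate]
    simp only [List.nil_append]
    congr 1
    · -- first num_hi chunks: length lo+1
      apply List.map_congr_left
      intro j hj
      rw [List.mem_range] at hj
      rw [min_eq_left (show (j : Int) ≤ h by omega),
          min_eq_left (show (j : Int) + 1 ≤ h by omega)]
      simp only [Prod.mk.injEq]
      constructor <;> ring
    · -- remaining chunks: length lo, offset num_hi*(lo+1)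
      apply List.map_congr_left
      intro j hj
      rw [List.mem_range] at hj
      rw [min_eq_right (show h ≤ ((a + j : Nat) : Int) by push_cast; omega),
          min_eq_right (show h ≤ ((a + j : Nat) : Int) + 1 by push_cast; omega)]
      simp only [Prod.mk.injEq]
      constructor <;> (push_cast; rw [hha]; ring)
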